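-- pv_equiv track=rewrite | github.com/YuHyeonGeun-KOR/My-Algorithm-Journey | This is cote/Chapter 4.Implementation/tetromino.py | illzza
-- ===== SOURCE A (Python) =====
-- def illzza (N,M,board):
--     result = 0
--     for i in range(0,N):
--         for j in range(0,M-3):
--             result = max(result,sum(board[i][j:j+4]))
--
--     for i in range(0,N-3):
--         for j in range(0,M):
--             result = max(result,(board[i][j]+board[i+1][j]+board[i+2][j]+board[i+3][j]))
--
--     return result
-- ===== SOURCE B (Python) =====
-- def _prefix(xs):
--     pref = [0]
--     for x in xs:
--         pref.append(pref[-1] + x)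
--     return pref
--
--
-- def illzza(N, M, board):
--     best = 0
--     if M >= 4:
--         rowpref = [_prefix(board[i]) for i in range(N)]
--         for i in range(N):
--             for j in range(M - 3):
--                 best = max(best, rowpref[i][j + 4] - rowpref[i][j])
--     if N >= 4:
--         colpref = [_prefix([board[i][j] for i in range(N)]) for j in range(M)]
--         for i in range(N - 3):
--             for j in range(M):
--                 best = max(best, colpref[j][i + 4] - colpref[j][i])
--     return best
-- ===== Notes on version B (the rewrite author's own statement) =====
-- stated objective: alternative
-- what changed: B precomputes row and column prefix-sum tables once and reads each 4-cell window as a single prefix difference, instead of A re-summing a fresh 4-cell slice (or 4 indexed adds) for every window.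
-- outside the precondition, e.g. on illzza(1, 4, [[1, 2, 3]]): A returns 6, B raises IndexError
import Mathlib
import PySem

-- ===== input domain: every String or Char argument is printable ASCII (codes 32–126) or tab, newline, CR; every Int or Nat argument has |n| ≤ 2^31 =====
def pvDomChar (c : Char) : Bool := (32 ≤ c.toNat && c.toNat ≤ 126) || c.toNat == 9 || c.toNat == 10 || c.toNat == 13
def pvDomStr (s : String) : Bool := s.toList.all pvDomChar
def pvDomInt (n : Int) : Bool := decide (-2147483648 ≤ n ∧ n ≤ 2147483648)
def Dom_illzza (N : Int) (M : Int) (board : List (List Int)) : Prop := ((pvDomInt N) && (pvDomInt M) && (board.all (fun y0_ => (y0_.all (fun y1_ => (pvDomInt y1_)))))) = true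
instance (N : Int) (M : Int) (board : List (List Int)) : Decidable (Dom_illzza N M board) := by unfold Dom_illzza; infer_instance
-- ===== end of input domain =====

-- B replaces A's per-window re-summation by row/column prefix-sum tables built once,
-- each 4-cell window then being a single prefix difference (objective: alternative decomposition).

-- ===== PORT A =====
def illzza (N : Int) (M : Int) (board : List (List Int)) : Int :=
  let r1 : Int :=
    (PySem.List.pyRange 0 N 1).foldl (fun result i =>
      (PySem.List.pyRange 0 (M - 3) 1).foldl (fun result j =>
        max result ((PySem.List.slice (PySem.List.pyGetD board i []) (some j) (some (j + 4))).sum)) result) 0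
  (PySem.List.pyRange 0 (N - 3) 1).foldl (fun result i =>
    (PySem.List.pyRange 0 M 1).foldl (fun result j =>
      max result (PySem.List.pyGetD (PySem.List.pyGetD board i []) j 0
        + PySem.List.pyGetD (PySem.List.pyGetD board (i + 1) []) j 0
        + PySem.List.pyGetD (PySem.List.pyGetD board (i + 2) []) j 0
        + PySem.List.pyGetD (PySem.List.pyGetD board (i + 3) []) j 0)) result) r1

-- ===== PORT B =====
-- port of Source B's _prefix: pref = [0]; for x in xs: pref.append(pref[-1] + x)
def pyPrefix (xs : List Int) : List Int :=
  xs.foldl (fun pref x => pref ++ [PySem.List.pyGetD pref (-1) 0 + x]) [0]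

def illzza_alt (N : Int) (M : Int) (board : List (List Int)) : Int :=
  let best : Int := 0
  let best : Int :=
    if 4 ≤ M then
      let rowpref := (PySem.List.pyRange 0 N 1).map (fun i => pyPrefix (PySem.List.pyGetD board i []))
      (PySem.List.pyRange 0 N 1).foldl (fun best i =>
        (PySem.List.pyRange 0 (M - 3) 1).foldl (fun best j =>
          max best (PySem.List.pyGetD (PySem.List.pyGetD rowpref i []) (j + 4) 0
                    - PySem.List.pyGetD (PySem.List.pyGetD rowpref i []) j 0)) best) best
    else best
  if 4 ≤ N then
    let colpref := (PySem.List.pyRange 0 M 1).map (fun j =>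
      pyPrefix ((PySem.List.pyRange 0 N 1).map (fun i =>
        PySem.List.pyGetD (PySem.List.pyGetD board i []) j 0)))
    (PySem.List.pyRange 0 (N - 3) 1).foldl (fun best i =>
      (PySem.List.pyRange 0 M 1).foldl (fun best j =>
        max best (PySem.List.pyGetD (PySem.List.pyGetD colpref j []) (i + 4) 0
                  - PySem.List.pyGetD (PySem.List.pyGetD colpref j []) i 0)) best) best
  else best

-- ===== PRECONDITION & SPEC =====
-- Pre_ requires, whenever either pass actually touches the board (horizontal: M ≥ 4 and N ≥ 1;
-- vertical: N ≥ 4 and M ≥ 1), that the board has at least N rows each of length ≥ M; it thereby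
-- excludes ragged boards with a row shorter than M under M ≥ 4, on which A's slice silently sums
-- fewer than 4 cells while B's prefix-table lookup raises IndexError.
def Pre_illzza (N : Int) (M : Int) (board : List (List Int)) : Prop :=
  ((4 ≤ M ∧ 1 ≤ N) ∨ (4 ≤ N ∧ 1 ≤ M)) →
    N ≤ (board.length : Int) ∧ ∀ row ∈ board.take N.toNat, M ≤ (row.length : Int)
instance (N : Int) (M : Int) (board : List (List Int)) : Decidable (Pre_illzza N M board) := by
  unfold Pre_illzza; infer_instance

def pvWitness_illzza : Int × Int × List (List Int) :=
  (4, 4, [[1, 2, 3, 4], [5, 6, 7, 8], [9, 10, 11, 12], [13, 14, 15, 16]])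

def Spec_illzza (N : Int) (M : Int) (board : List (List Int)) (out : Int) : Prop := out = illzza_alt N M board
instance (N : Int) (M : Int) (board : List (List Int)) (out : Int) : Decidable (Spec_illzza N M board out) := by unfold Spec_illzza; infer_instance

-- ===== CLAIM (what is proved, stated in full; the proofs are below) =====
def Claim_equal_illzza : Prop := ∀ (N : Int) (M : Int) (board : List (List Int)), Dom_illzza N M board → Pre_illzza N M board → Spec_illzza N M board (illzza N M board)

-- ===== LEMMAS AND PROOFS =====

-- the prefix fold produces exactly the list of prefix sums
theorem pyPrefix_eq (xs : List Int) :
    pyPrefix xs = (List.range (xs.length + 1)).map (fun k => ((xs.take k).sum : Int)) := by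
  induction xs using List.reverseRecOn with
  | nil => simp [pyPrefix]
  | append_singleton l x ih =>
    unfold pyPrefix at ih ⊢
    rw [List.foldl_append, ih, List.foldl_cons, List.foldl_nil]
    have hlen : (l ++ [x]).length + 1 = (l.length + 1) + 1 := by simp
    have hlast : PySem.List.pyGetD
        (List.map (fun k => ((l.take k).sum : Int)) (List.range (l.length + 1))) (-1) 0 = l.sum := by
      rw [show List.range (l.length + 1) = List.range l.length ++ [l.length] from List.range_succ,
        List.map_append]
      simp only [List.map_cons, List.map_nil]
      rw [PySem.List.pyGetD_neg_one_append_singleton, List.take_length]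
    have hsplit : List.map (fun k => (((l ++ [x]).take k).sum : Int)) (List.range (l.length + 1 + 1))
        = List.map (fun k => ((l.take k).sum : Int)) (List.range (l.length + 1)) ++ [l.sum + x] := by
      rw [List.range_succ, List.map_append]
      congr 1
      · apply List.map_congr_left
        intro k hk
        rw [List.mem_range] at hk
        rw [List.take_append_of_le_length (by omega)]
      · simp [List.take_of_length_le]
    rw [hlen, hsplit, hlast]

theorem pyPrefix_get (xs : List Int) (k : Nat) (hk : k ≤ xs.length) :
    PySem.List.pyGetD (pyPrefix xs) (k : Int) 0 = (xs.take k).sum := by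
  rw [pyPrefix_eq, PySem.List.pyGetD_natCast]
  rw [List.getD_eq_getElem?_getD, List.getElem?_map, List.getElem?_range (by omega)]
  simp

-- sum of a window as a difference of prefix sums
theorem sum_take_drop (l : List Int) (a b : Nat) :
    (((l.drop a).take b).sum : Int) = (l.take (a + b)).sum - (l.take a).sum := by
  rw [List.take_add, List.sum_append]
  ring

-- a 4-cell window written out
theorem sum_window4 (l : List Int) (a : Nat) (h : a + 4 ≤ l.length) :
    (((l.drop a).take 4).sum : Int)
      = l[a]'(by omega) + l[a + 1]'(by omega) + l[a + 2]'(by omega) + l[a + 3]'(by omega) := by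
  rw [List.drop_eq_getElem_cons (by omega)]
  rw [List.drop_eq_getElem_cons (show a + 1 < l.length by omega)]
  rw [List.drop_eq_getElem_cons (show a + 1 + 1 < l.length by omega)]
  rw [List.drop_eq_getElem_cons (show a + 1 + 1 + 1 < l.length by omega)]
  simp only [List.take_succ_cons, List.take_zero, List.sum_cons, List.sum_nil]
  have h2 : a + 1 + 1 = a + 2 := by omega
  have h3 : a + 1 + 1 + 1 = a + 3 := by omega
  simp_rw [h2, h3]
  ring

theorem foldl_const {α : Type} (l : List α) (r : Int) :
    l.foldl (fun acc (_ : α) => acc) r = r := by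
  induction l generalizing r with
  | nil => rfl
  | cons x xs ih => simp only [List.foldl_cons]; exact ih r

-- row lookup facts
theorem row_mem_take (board : List (List Int)) (N : Int) (i : Int)
    (hi : 0 ≤ i) (hiN : i < N) (hlen : N ≤ (board.length : Int)) :
    PySem.List.pyGetD board i [] ∈ board.take N.toNat := by
  have h1 : i.toNat < board.length := by omega
  rw [PySem.List.pyGetD_eq_getElem board [] hi (by omega)]
  have h2 : i.toNat < (board.take N.toNat).length := by
    simp only [List.length_take]
    omega
  have h3 : (board.take N.toNat)[i.toNat]'h2 = board[i.toNat]'h1 := List.getElem_take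
  rw [← h3]
  exact List.getElem_mem h2

-- the horizontal 4-window as a prefix difference
theorem hwin (board : List (List Int)) (N M : Int)
    (hlen : N ≤ (board.length : Int))
    (hrow : ∀ row ∈ board.take N.toNat, M ≤ (row.length : Int))
    (i j : Int) (hi : 0 ≤ i) (hiN : i < N) (hj : 0 ≤ j) (hjM : j < M - 3) :
    ((PySem.List.slice (PySem.List.pyGetD board i []) (some j) (some (j + 4))).sum : Int)
      = PySem.List.pyGetD (pyPrefix (PySem.List.pyGetD board i [])) (j + 4) 0
        - PySem.List.pyGetD (pyPrefix (PySem.List.pyGetD board i [])) j 0 := by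
  set row := PySem.List.pyGetD board i [] with hrowdef
  have hM : M ≤ (row.length : Int) := hrow row (row_mem_take board N i hi hiN hlen)
  rw [PySem.List.slice_toNat row hj (by omega)]
  rw [show (j + 4).toNat - j.toNat = 4 by omega]
  rw [sum_take_drop row j.toNat 4]
  rw [show (j : Int) = ((j.toNat : Nat) : Int) by omega]
  rw [show ((j.toNat : Nat) : Int) + 4 = ((j.toNat + 4 : Nat) : Int) by push_cast; ring]
  rw [pyPrefix_get row j.toNat (by omega), pyPrefix_get row (j.toNat + 4) (by omega)]
  rw [show ((j.toNat : Nat) : Int).toNat = j.toNat from by omega]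

-- the vertical 4-window as a prefix difference over the column list
theorem vwin (board : List (List Int)) (N : Int)
    (i j : Int) (hi : 0 ≤ i) (hiN : i < N - 3) :
    PySem.List.pyGetD (PySem.List.pyGetD board i []) j 0
      + PySem.List.pyGetD (PySem.List.pyGetD board (i + 1) []) j 0
      + PySem.List.pyGetD (PySem.List.pyGetD board (i + 2) []) j 0
      + PySem.List.pyGetD (PySem.List.pyGetD board (i + 3) []) j 0
      = PySem.List.pyGetD (pyPrefix ((PySem.List.pyRange 0 N 1).map (fun i' =>
          PySem.List.pyGetD (PySem.List.pyGetD board i' []) j 0))) (i + 4) 0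
        - PySem.List.pyGetD (pyPrefix ((PySem.List.pyRange 0 N 1).map (fun i' =>
          PySem.List.pyGetD (PySem.List.pyGetD board i' []) j 0))) i 0 := by
  set col := (PySem.List.pyRange 0 N 1).map (fun i' =>
    PySem.List.pyGetD (PySem.List.pyGetD board i' []) j 0) with hcoldef
  have hcollen : col.length = (N - 0).toNat := by
    rw [hcoldef, List.length_map, PySem.List.length_pyRange_one]
  rw [show (i : Int) = ((i.toNat : Nat) : Int) by omega]
  rw [show ((i.toNat : Nat) : Int) + 4 = ((i.toNat + 4 : Nat) : Int) by push_cast; ring]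
  rw [pyPrefix_get col i.toNat (by omega), pyPrefix_get col (i.toNat + 4) (by omega)]
  rw [← sum_take_drop col i.toNat 4]
  rw [sum_window4 col i.toNat (by omega)]
  simp only [hcoldef, List.getElem_map, PySem.List.getElem_pyRange_one]
  rw [show (0 : Int) + ((i.toNat : Nat) : Int) = ((i.toNat : Nat) : Int) by ring,
      show (0 : Int) + ((i.toNat + 1 : Nat) : Int) = ((i.toNat : Nat) : Int) + 1 by push_cast; ring,
      show (0 : Int) + ((i.toNat + 2 : Nat) : Int) = ((i.toNat : Nat) : Int) + 2 by push_cast; ring,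
      show (0 : Int) + ((i.toNat + 3 : Nat) : Int) = ((i.toNat : Nat) : Int) + 3 by push_cast; ring]

-- ===== VERDICT (by name: the statement is the Claim_ definition above) =====
theorem illzza_spec : Claim_equal_illzza := by
  intro N M board _ hPre
  unfold Spec_illzza
  show illzza N M board = illzza_alt N M board
  unfold illzza illzza_alt
  -- the horizontal stage of A equals the horizontal stage of B
  have hH : (PySem.List.pyRange 0 N 1).foldl (fun result i =>
        (PySem.List.pyRange 0 (M - 3) 1).foldl (fun result j =>
          max result ((PySem.List.slice (PySem.List.pyGetD board i []) (some j) (some (j + 4))).sum)) result) 0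
      = (if 4 ≤ M then
          (PySem.List.pyRange 0 N 1).foldl (fun best i =>
            (PySem.List.pyRange 0 (M - 3) 1).foldl (fun best j =>
              max best (PySem.List.pyGetD (PySem.List.pyGetD ((PySem.List.pyRange 0 N 1).map (fun i => pyPrefix (PySem.List.pyGetD board i []))) i []) (j + 4) 0
                        - PySem.List.pyGetD (PySem.List.pyGetD ((PySem.List.pyRange 0 N 1).map (fun i => pyPrefix (PySem.List.pyGetD board i []))) i []) j 0)) best) (0 : Int)
        else (0 : Int)) := by
    by_cases hM : 4 ≤ M
    · rw [if_pos hM]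
      apply PySem.List.foldl_congr_mem
      intro acc i hi
      rw [PySem.List.mem_pyRange_one] at hi
      obtain ⟨hPre1, hPre2⟩ := hPre (Or.inl ⟨hM, by omega⟩)
      apply PySem.List.foldl_congr_mem
      intro acc2 jj hjj
      rw [PySem.List.mem_pyRange_one] at hjj
      rw [PySem.List.pyGetD_map_pyRange_of_nonneg _ N i [] hi.1 hi.2]
      rw [hwin board N M hPre1 hPre2 i jj hi.1 hi.2 hjj.1 hjj.2]
    · rw [if_neg hM]
      rw [PySem.List.pyRange_one_eq_nil (by omega : M - 3 ≤ 0)]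
      simp only [List.foldl_nil]
      exact foldl_const _ 0
  rw [hH]
  by_cases hN : 4 ≤ N
  · rw [if_pos hN]
    apply PySem.List.foldl_congr_mem
    intro acc i hi
    rw [PySem.List.mem_pyRange_one] at hi
    apply PySem.List.foldl_congr_mem
    intro acc2 jj hjj
    rw [PySem.List.mem_pyRange_one] at hjj
    obtain ⟨hPre1, _⟩ := hPre (Or.inr ⟨hN, by omega⟩)
    rw [PySem.List.pyGetD_map_pyRange_of_nonneg _ M jj [] hjj.1 hjj.2]
    rw [vwin board N i jj hi.1 hi.2]
  · rw [if_neg hN]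
    rw [PySem.List.pyRange_one_eq_nil (by omega : N - 3 ≤ 0)]
    simp only [List.foldl_nil]
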